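-- pv_equiv track=rewrite | github.com/illancillotto/GAIA | backend/app/modules/operazioni/services/import_white.py | _extract_base_title_and_event_type
-- ===== SOURCE A (Python) =====
-- EVENT_TYPE_MAPPING = {
--     "Richiesta di intervento": "richiesta_intervento",
--     "Richiesta materiale Magazzino": "richiesta_materiale",
--     "Assegnazione/Riassegnazione incaricato": "assegnazione_incaricato",
--     "Eseguita riparazione": "riparazione_eseguita",
--     "Sopralluogo": "sopralluogo",
--     "Contestazione all'utente": "contestazione_utente",
-- }
--
-- def _extract_base_title_and_event_type(title: str | None) -> tuple[str | None, str | None]: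
--     if not title:
--         return None, None
--     normalized = title.strip()
--     for suffix, event_type in EVENT_TYPE_MAPPING.items():
--         marker = f" - {suffix}"
--         if normalized.endswith(marker):
--             return normalized[: -len(marker)].strip(), event_type
--     return normalized, None
-- ===== SOURCE B (Python) =====
-- EVENT_TYPE_MAPPING = {
--     "Richiesta di intervento": "richiesta_intervento",
--     "Richiesta materiale Magazzino": "richiesta_materiale",
--     "Assegnazione/Riassegnazione incaricato": "assegnazione_incaricato",
--     "Eseguita riparazione": "riparazione_eseguita",
--     "Sopralluogo": "sopralluogo",
--     "Contestazione all'utente": "contestazione_utente",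
-- }
--
-- def _extract_base_title_and_event_type(title):
--     if not title:
--         return None, None
--     normalized = title.strip()
--     base, sep, candidate = normalized.rpartition(" - ")
--     if sep:
--         event_type = EVENT_TYPE_MAPPING.get(candidate)
--         if event_type is not None:
--             return base.strip(), event_type
--     return normalized, None
-- ===== Notes on version B (the rewrite author's own statement) =====
-- stated objective: idiomatic
-- what changed: B replaces A's loop over all EVENT_TYPE_MAPPING entries testing each suffix marker with endswith by a single rpartition at the last separator occurrence, followed by one direct dict lookup of the candidate.
import Mathlib
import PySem

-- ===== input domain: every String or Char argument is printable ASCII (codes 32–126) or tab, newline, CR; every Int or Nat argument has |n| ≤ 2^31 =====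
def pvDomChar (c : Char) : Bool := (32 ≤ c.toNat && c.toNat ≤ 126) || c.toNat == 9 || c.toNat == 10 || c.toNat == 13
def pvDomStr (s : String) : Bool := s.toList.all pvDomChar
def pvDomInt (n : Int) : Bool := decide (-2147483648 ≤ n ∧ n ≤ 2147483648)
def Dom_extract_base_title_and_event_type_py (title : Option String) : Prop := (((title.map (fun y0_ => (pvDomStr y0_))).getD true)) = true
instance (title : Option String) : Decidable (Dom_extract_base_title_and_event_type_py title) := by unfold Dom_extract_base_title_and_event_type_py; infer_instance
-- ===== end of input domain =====

-- B replaces A's scan over all mapping entries with endswith by one rpartition at the last separator plus a single dict lookup (idiomatic decomposition, same cost in practice).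


-- the module constant EVENT_TYPE_MAPPING (keys as char lists, insertion order kept)
def pvEventTypeMapping : PySem.Dict (List Char) String := PySem.Dict.mk
  [ ("Richiesta di intervento".toList, "richiesta_intervento"),
    ("Richiesta materiale Magazzino".toList, "richiesta_materiale"),
    ("Assegnazione/Riassegnazione incaricato".toList, "assegnazione_incaricato"),
    ("Eseguita riparazione".toList, "riparazione_eseguita"),
    ("Sopralluogo".toList, "sopralluogo"),
    ("Contestazione all'utente".toList, "contestazione_utente") ]

-- ===== PORT A =====
-- the for-loop of A over EVENT_TYPE_MAPPING.items()
def pvALoop (normalized : List Char) : List (List Char × String) → Option String × Option String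
  | [] => (some (String.ofList normalized), none)
  | (suffix, event_type) :: rest =>
    let marker := ' ' :: '-' :: ' ' :: suffix   -- f" - {suffix}"
    if PySem.Chars.endswith normalized marker then
      (some (String.ofList (PySem.Chars.strip
          (PySem.List.slice normalized none (some (-(marker.length : Int)))))), some event_type)
    else pvALoop normalized rest

def extract_base_title_and_event_type_py (title : Option String) : Option String × Option String :=
  match title with
  | none => (none, none)
  | some t =>
    if t = "" then (none, none)   -- `if not title`
    else
      let normalized := PySem.Chars.strip t.toList
      pvALoop normalized pvEventTypeMapping.items

-- ===== PORT B =====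
-- Source B: strip, rpartition at the separator, then a single dict .get on the candidate.
-- str.rpartition is not a PySem primitive; it is ported exactly as: split at the
-- HIGHEST occurrence of the separator (PySem.Chars.rfind), sep empty iff rfind = -1.
def extract_base_title_and_event_type_py_alt (title : Option String) : Option String × Option String :=
  match title with
  | none => (none, none)
  | some t =>
    if t = "" then (none, none)   -- `if not title`
    else
      let normalized := PySem.Chars.strip t.toList
      let i := PySem.Chars.rfind normalized [' ', '-', ' ']
      if i = -1 then (some (String.ofList normalized), none)   -- sep == "" : no split
      else
        match PySem.Dict.get? pvEventTypeMapping (normalized.drop (i.toNat + 3)) with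
        | some event_type =>
            (some (String.ofList (PySem.Chars.strip (normalized.take i.toNat))), some event_type)
        | none => (some (String.ofList normalized), none)

-- ===== PRECONDITION & SPEC =====
def Spec_extract_base_title_and_event_type_py (title : Option String) (out : Option String × Option String) : Prop := out = extract_base_title_and_event_type_py_alt title
instance (title : Option String) (out : Option String × Option String) : Decidable (Spec_extract_base_title_and_event_type_py title out) := by unfold Spec_extract_base_title_and_event_type_py; infer_instance

-- ===== CLAIM (what is proved, stated in full; the proofs are below) =====
def Claim_equal_extract_base_title_and_event_type_py : Prop := ∀ (title : Option String), Dom_extract_base_title_and_event_type_py title → Spec_extract_base_title_and_event_type_py title (extract_base_title_and_event_type_py title)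

-- ===== LEMMAS AND PROOFS =====

-- a mapping suffix never contains the separator, and never starts with a space or a dash-space
def pvGoodSuffix (s : List Char) : Prop :=
  ¬ ([' ', '-', ' '] <:+: s) ∧ s.take 1 ≠ [' '] ∧ s.take 2 ≠ ['-', ' ']

theorem pvMapping_good : ∀ p ∈ pvEventTypeMapping.items, pvGoodSuffix p.1 := by
  unfold pvGoodSuffix pvEventTypeMapping
  decide

-- s[:-k] for 0 < k ≤ len s
theorem pv_slice_neg (l : List Char) (k : Nat) (hpos : 0 < k) (hk : k ≤ l.length) :
    PySem.List.slice l none (some (-(k : Int))) = l.take (l.length - k) := by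
  simp only [PySem.List.slice, PySem.List.clampIdx]
  have h1 : (-(k : Int)) < 0 := by omega
  have h2 : ¬ ((l.length : Int) + -(k : Int) < 0) := by omega
  simp only [if_pos h1, if_neg h2]
  congr 1
  omega

-- rfind.go searches positions k, k-1, …, 0 for the highest prefix-occurrence
theorem pv_rfind_go_cases (s sub : List Char) (k : Nat) :
    (PySem.Chars.rfind.go s sub k = -1 ∧ ∀ j ≤ k, ¬ sub <+: s.drop j) ∨
    (∃ m, m ≤ k ∧ PySem.Chars.rfind.go s sub k = (m : Int) ∧ sub <+: s.drop m ∧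
      ∀ j, m < j → j ≤ k → ¬ sub <+: s.drop j) := by
  induction k with
  | zero =>
    rw [PySem.Chars.rfind.go]
    by_cases h : sub.isPrefixOf s
    · right
      exact ⟨0, le_refl 0, by simp [h], by simpa using List.isPrefixOf_iff_prefix.mp h, by omega⟩
    · left
      refine ⟨by simp [h], ?_⟩
      intro j hj
      interval_cases j
      simpa using fun hc => h (List.isPrefixOf_iff_prefix.mpr (by simpa using hc))
  | succ k ih =>
    rw [PySem.Chars.rfind.go]
    by_cases h : sub.isPrefixOf (s.drop (k + 1))
    · right
      refine ⟨k + 1, le_refl _, by simp [h], List.isPrefixOf_iff_prefix.mp h, by omega⟩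
    · simp only [h]
      rcases ih with ⟨h1, h2⟩ | ⟨m, hm, h1, h2, h3⟩
      · left
        refine ⟨h1, ?_⟩
        intro j hj
        rcases Nat.lt_or_ge j (k + 1) with hlt | hge
        · exact h2 j (by omega)
        · have : j = k + 1 := by omega
          subst this
          exact fun hc => h (List.isPrefixOf_iff_prefix.mpr hc)
      · right
        refine ⟨m, by omega, h1, h2, ?_⟩
        intro j hj1 hj2
        rcases Nat.lt_or_ge j (k + 1) with hlt | hge
        · exact h3 j hj1 (by omega)
        · have : j = k + 1 := by omega
          subst this
          exact fun hc => h (List.isPrefixOf_iff_prefix.mpr hc)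

theorem pv_rfind_cases (s sub : List Char) (hsub : sub ≠ []) :
    (PySem.Chars.rfind s sub = -1 ∧ ∀ j, ¬ sub <+: s.drop j) ∨
    (∃ m : Nat, PySem.Chars.rfind s sub = (m : Int) ∧ sub <+: s.drop m ∧
      ∀ j, m < j → ¬ sub <+: s.drop j) := by
  have hbig : ∀ j, s.length < j → ¬ sub <+: s.drop j := by
    intro j hj hc
    rw [List.drop_eq_nil_of_le (by omega)] at hc
    exact hsub (List.prefix_nil.mp hc)
  rcases pv_rfind_go_cases s sub s.length with ⟨h1, h2⟩ | ⟨m, hm, h1, h2, h3⟩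
  · left
    refine ⟨h1, fun j => ?_⟩
    rcases le_or_gt j s.length with hle | hlt
    · exact h2 j hle
    · exact hbig j hlt
  · right
    refine ⟨m, h1, h2, fun j hj => ?_⟩
    rcases le_or_gt j s.length with hle | hlt
    · exact h3 j hj hle
    · exact hbig j hlt

theorem pv_endswith_occ (ns s : List Char)
    (h : PySem.Chars.endswith ns (' ' :: '-' :: ' ' :: s) = true) :
    ∃ p, ns = p ++ ' ' :: '-' :: ' ' :: s ∧ [' ', '-', ' '] <+: ns.drop p.length := by
  obtain ⟨p, hp⟩ := (PySem.Chars.endswith_iff ns _).mp h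
  refine ⟨p, hp.symm, ?_⟩
  rw [hp.symm, List.drop_left' rfl]
  exact ⟨s, rfl⟩

theorem pv_aLoop_all_false (ns : List Char) (l : List (List Char × String))
    (h : ∀ p ∈ l, PySem.Chars.endswith ns (' ' :: '-' :: ' ' :: p.1) = false) :
    pvALoop ns l = (some (String.ofList ns), none) := by
  induction l with
  | nil => rfl
  | cons p rest ih =>
    obtain ⟨suffix, event_type⟩ := p
    rw [pvALoop]
    simp only [h ⟨suffix, event_type⟩ (by simp)]
    exact ih fun q hq => h q (by simp [hq])

theorem pv_aLoop_find (ns cand : List Char) (l : List (List Char × String))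
    (hiff : ∀ p ∈ l, (PySem.Chars.endswith ns (' ' :: '-' :: ' ' :: p.1) = true ↔ p.1 = cand)) :
    pvALoop ns l =
      match l.find? (fun p => p.1 == cand) with
      | some p => (some (String.ofList (PySem.Chars.strip
          (PySem.List.slice ns none (some (-((p.1.length + 3 : Nat) : Int)))))), some p.2)
      | none => (some (String.ofList ns), none) := by
  induction l with
  | nil => rfl
  | cons p rest ih =>
    obtain ⟨suffix, event_type⟩ := p
    rw [pvALoop, List.find?_cons]
    by_cases hs : suffix = cand
    · subst hs
      have he : PySem.Chars.endswith ns (' ' :: '-' :: ' ' :: suffix) = true :=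
        (hiff ⟨suffix, event_type⟩ (by simp)).mpr rfl
      rw [if_pos he]
      simp only [show (suffix == suffix) = true by simp]
      have h3 : ((' ' :: '-' :: ' ' :: suffix).length : Int) = ((suffix.length + 3 : Nat) : Int) := by
        push_cast [List.length_cons]
        ring
      rw [h3]
    · have he : PySem.Chars.endswith ns (' ' :: '-' :: ' ' :: suffix) = false := by
        rcases Bool.eq_false_or_eq_true (PySem.Chars.endswith ns (' ' :: '-' :: ' ' :: suffix)) with h | h
        · exact absurd ((hiff ⟨suffix, event_type⟩ (by simp)).mp h) hs
        · exact h
      rw [if_neg (by simp [he])]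
      simp only [show (suffix == cand) = false by simp [hs]]
      exact ih fun q hq => hiff q (by simp [hq])

-- with the highest separator occurrence at k, a good suffix matches endswith iff it IS the candidate
theorem pv_match_iff (ns s : List Char) (k : Nat)
    (hg : pvGoodSuffix s)
    (hk : [' ', '-', ' '] <+: ns.drop k)
    (hmax : ∀ j, k < j → ¬ [' ', '-', ' '] <+: ns.drop j) :
    (PySem.Chars.endswith ns (' ' :: '-' :: ' ' :: s) = true ↔ s = ns.drop (k + 3)) := by
  obtain ⟨r, hr⟩ := hk
  have hcand : ns.drop (k + 3) = r := by
    have : (ns.drop k).drop 3 = ns.drop (k + 3) := by rw [List.drop_drop, Nat.add_comm]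
    rw [← this, ← hr]
    rfl
  have hsk : ns.drop k = ' ' :: '-' :: ' ' :: ns.drop (k + 3) := by
    rw [hcand, ← hr]
    rfl
  have hkle : k ≤ ns.length := by
    by_contra hlt
    rw [List.drop_eq_nil_of_le (by omega)] at hsk
    exact absurd hsk (by simp)
  have hlen : ns.length = k + 3 + (ns.drop (k + 3)).length := by
    have h1 := congrArg List.length hsk
    simp only [List.length_drop, List.length_cons] at h1
    simp only [List.length_drop]
    omega
  constructor
  · intro h
    obtain ⟨p, hns, hp⟩ := pv_endswith_occ ns s h
    have hple : p.length ≤ k := by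
      by_contra hgt
      exact hmax p.length (by omega) hp
    have hnslen : ns.length = p.length + 3 + s.length := by
      have := congrArg List.length hns
      simp at this
      omega
    have hclen : (ns.drop (k + 3)).length ≤ s.length := by omega
    have hS1 : (' ' :: '-' :: ' ' :: ns.drop (k + 3)) <:+ ns := ⟨ns.take k, by rw [← hsk]; simp⟩
    have hS2 : (' ' :: '-' :: ' ' :: s) <:+ ns := ⟨p, hns.symm⟩
    have hS12 : (' ' :: '-' :: ' ' :: ns.drop (k + 3)) <:+ (' ' :: '-' :: ' ' :: s) :=
      List.suffix_of_suffix_length_le hS1 hS2 (by simp; omega)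
    obtain ⟨q, hq⟩ := hS12
    match q, hq with
    | [], hq =>
      simp only [List.nil_append] at hq
      injection hq with _ hq; injection hq with _ hq; injection hq with _ hq
      exact hq.symm
    | [a], hq =>
      simp only [List.cons_append, List.nil_append] at hq
      injection hq with _ hq; injection hq with hbad _
      exact absurd hbad (by decide)
    | [a, b], hq =>
      simp only [List.cons_append, List.nil_append] at hq
      injection hq with _ hq; injection hq with _ hq; injection hq with _ hq
      exact absurd (by rw [← hq]; rfl : s.take 2 = ['-', ' ']) hg.2.2
    | a :: b :: c :: t, hq =>
      exfalso
      have hql : (3 + (ns.drop (k+3)).length + 3 ≤ s.length + 3) := by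
        have := congrArg List.length hq
        simp only [List.length_append, List.length_cons] at this
        omega
      have hsfx : (' ' :: '-' :: ' ' :: ns.drop (k + 3)) <:+ s :=
        List.suffix_of_suffix_length_le ⟨a :: b :: c :: t, hq⟩
          ⟨[' ', '-', ' '], rfl⟩ (by simp at hql ⊢; omega)
      obtain ⟨w, hw⟩ := hsfx
      exact hg.1 ⟨w, ns.drop (k + 3), by rw [← hw]; simp⟩
  · intro h
    subst h
    exact (PySem.Chars.endswith_iff ns _).mpr ⟨ns.take k, by rw [← hsk]; simp⟩

-- a separator occurrence at k fixes the length bookkeeping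
theorem pv_occ_len (ns : List Char) (k : Nat)
    (hk : [' ', '-', ' '] <+: ns.drop k) :
    ns.length = k + 3 + (ns.drop (k + 3)).length ∧ ns.drop k = ' ' :: '-' :: ' ' :: ns.drop (k + 3) := by
  obtain ⟨r, hr⟩ := hk
  have hcand : ns.drop (k + 3) = r := by
    have h0 : (ns.drop k).drop 3 = ns.drop (k + 3) := by rw [List.drop_drop, Nat.add_comm]
    rw [← h0, ← hr]
    rfl
  have hsk : ns.drop k = ' ' :: '-' :: ' ' :: ns.drop (k + 3) := by
    rw [hcand, ← hr]
    rfl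
  refine ⟨?_, hsk⟩
  have h1 := congrArg List.length hsk
  simp only [List.length_drop, List.length_cons] at h1
  simp only [List.length_drop]
  omega

-- the heart: for every char list the A-loop equals B's rpartition + lookup
theorem pv_core (ns : List Char) :
    pvALoop ns pvEventTypeMapping.items =
      (let i := PySem.Chars.rfind ns [' ', '-', ' ']
       if i = -1 then (some (String.ofList ns), none)
       else
         match PySem.Dict.get? pvEventTypeMapping (ns.drop (i.toNat + 3)) with
         | some event_type =>
             (some (String.ofList (PySem.Chars.strip (ns.take i.toNat))), some event_type)
         | none => (some (String.ofList ns), none)) := by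
  rcases pv_rfind_cases ns [' ', '-', ' '] (by simp) with ⟨h1, h2⟩ | ⟨m, h1, h2, h3⟩
  · have hall : ∀ p ∈ pvEventTypeMapping.items,
        PySem.Chars.endswith ns (' ' :: '-' :: ' ' :: p.1) = false := by
      intro p _
      rcases Bool.eq_false_or_eq_true (PySem.Chars.endswith ns (' ' :: '-' :: ' ' :: p.1)) with ht | hf
      · obtain ⟨q, _, hocc⟩ := pv_endswith_occ ns p.1 ht
        exact absurd hocc (h2 q.length)
      · exact hf
    rw [pv_aLoop_all_false ns _ hall]
    simp [h1]
  · obtain ⟨hlen, hsk⟩ := pv_occ_len ns m h2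
    have hiff : ∀ p ∈ pvEventTypeMapping.items,
        (PySem.Chars.endswith ns (' ' :: '-' :: ' ' :: p.1) = true ↔ p.1 = ns.drop (m + 3)) :=
      fun p hp => pv_match_iff ns p.1 m (pvMapping_good p hp) h2 h3
    rw [pv_aLoop_find ns (ns.drop (m + 3)) _ hiff]
    have hne : ¬ ((m : Int) = -1) := by omega
    simp only [h1, if_neg hne, Int.toNat_natCast]
    have hget : PySem.Dict.get? pvEventTypeMapping (ns.drop (m + 3)) =
        Option.map (fun p => p.2)
          (List.find? (fun p => p.1 == ns.drop (m + 3)) pvEventTypeMapping.items) := rfl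
    rw [hget]
    cases hfind : List.find? (fun p => p.1 == ns.drop (m + 3)) pvEventTypeMapping.items with
    | none => rfl
    | some p =>
      have hp1 : p.1 = ns.drop (m + 3) := by
        have := List.find?_some hfind
        simpa using this
      simp only [Option.map_some]
      have hslice : PySem.List.slice ns none (some (-((p.1.length + 3 : Nat) : Int))) = ns.take m := by
        rw [pv_slice_neg ns (p.1.length + 3) (by omega) (by rw [hp1]; omega)]
        congr 1
        rw [hp1]
        omega
      rw [hslice]

-- ===== VERDICT (by name: the statement is the Claim_ definition above) =====
theorem extract_base_title_and_event_type_py_spec : Claim_equal_extract_base_title_and_event_type_py := by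
  intro title _
  unfold Spec_extract_base_title_and_event_type_py
  match title with
  | none => rfl
  | some t =>
    by_cases ht : t = ""
    · simp [extract_base_title_and_event_type_py, extract_base_title_and_event_type_py_alt, ht]
    · simp only [extract_base_title_and_event_type_py, extract_base_title_and_event_type_py_alt,
        if_neg ht]
      exact pv_core (PySem.Chars.strip t.toList)
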